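-- pv_equiv track=rewrite | github.com/sueszli/vector-database-benchmark | dataset/python-mutated/texttiling.py | _depth_scores
-- ===== SOURCE A (Python) =====
-- def _depth_scores(scores):
--     if False:
--         return 10
--     "Calculates the depth of each gap, i.e. the average difference\n        between the left and right peaks and the gap's score"
--     depth_scores = [0 for x in scores]
--     clip = min(max(len(scores) // 10, 2), 5)
--     index = clip
--     for gapscore in scores[clip:-clip]:
--         lpeak = gapscore
--         for score in scores[index::-1]:
--             if score >= lpeak:
--                 lpeak = score
--             else:
--                 break
--         rpeak = gapscore
--         for score in scores[index:]:
--             if score >= rpeak: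
--                 rpeak = score
--             else:
--                 break
--         depth_scores[index] = lpeak + rpeak - 2 * gapscore
--         index += 1
--     return depth_scores
-- ===== SOURCE B (Python) =====
-- def _depth_scores(scores):
--     n = len(scores)
--     clip = min(max(n // 10, 2), 5)
--     # left monotone-climb peaks in one pass: L[i] is the value reached by
--     # walking left from i while the values are non-decreasing leftwards
--     L = [0] * n
--     for i in range(n):
--         L[i] = L[i - 1] if i > 0 and scores[i - 1] >= scores[i] else scores[i]
--     # right monotone-climb peaks in one pass
--     R = [0] * n
--     for i in range(n - 1, -1, -1):
--         R[i] = R[i + 1] if i + 1 < n and scores[i + 1] >= scores[i] else scores[i]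
--     return [L[i] + R[i] - 2 * scores[i] if clip <= i < n - clip else 0
--             for i in range(n)]
-- ===== Notes on version B (the rewrite author's own statement) =====
-- stated objective: faster
-- what changed: A rescans left and right from every gap to find its climbing peaks (quadratic in the worst case); B precomputes all left and right monotone-climb peaks in two linear passes (L[i] from L[i-1], R[i] from R[i+1]) and emits each depth score in O(1).
import Mathlib
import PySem

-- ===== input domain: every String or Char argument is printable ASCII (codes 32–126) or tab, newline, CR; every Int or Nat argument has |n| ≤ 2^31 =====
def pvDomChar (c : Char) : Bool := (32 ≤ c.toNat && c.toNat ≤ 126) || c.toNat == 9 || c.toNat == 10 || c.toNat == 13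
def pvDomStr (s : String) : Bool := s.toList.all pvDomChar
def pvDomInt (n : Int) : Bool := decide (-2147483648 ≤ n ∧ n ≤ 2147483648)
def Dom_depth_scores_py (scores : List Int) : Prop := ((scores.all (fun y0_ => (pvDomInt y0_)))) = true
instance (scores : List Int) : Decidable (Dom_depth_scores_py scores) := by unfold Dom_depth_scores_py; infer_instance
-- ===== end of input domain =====

-- B replaces A's quadratic per-gap left/right peak rescans by two linear passes that
-- propagate the monotone-climb peak (objective: faster, asymptotic).

-- ===== PORT A =====
-- the for/break climbing loop: walk the list, raising the peak while elements are ≥ it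
def climbA (peak : Int) : List Int → Int
  | [] => peak
  | s :: rest => if s ≥ peak then climbA s rest else peak

-- the outer for-loop over scores[clip:-clip], carrying (depth_scores, index)
-- scores[index::-1] is ported as (scores.take (index.toNat+1)).reverse, exact since
-- index stays in [clip, len-clip) ⊆ [0, len) throughout the loop
def outerA (scores : List Int) : List Int → Int → List Int → List Int
  | d, _, [] => d
  | d, index, g :: rest =>
      let lpeak := climbA g ((scores.take (index.toNat + 1)).reverse)
      let rpeak := climbA g (PySem.List.slice scores (some index) none)
      outerA scores (d.set index.toNat (lpeak + rpeak - 2 * g)) (index + 1) rest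

def depth_scores_py (scores : List Int) : List Int :=
  let depth0 := scores.map (fun _ => (0 : Int))
  let clip : Int := min (max (PySem.Int.floordiv (scores.length : Int) 10) 2) 5
  outerA scores depth0 clip (PySem.List.slice scores (some clip) (some (-clip)))

-- ===== PORT B =====
-- left pass: prev = some (scores[i-1], L[i-1]) while scanning left to right
def lpassB : Option (Int × Int) → List Int → List Int
  | _, [] => []
  | prev, s :: rest =>
      let v := match prev with
        | some (ps, pl) => if ps ≥ s then pl else s
        | none => s
      v :: lpassB (some (s, v)) rest

-- right pass: R[i] from R[i+1] and scores[i+1], scanning right to left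
def rpassB : List Int → List Int
  | [] => []
  | s :: rest =>
      let r := rpassB rest
      (match rest, r with
       | s' :: _, v :: _ => if s' ≥ s then v else s
       | _, _ => s) :: r

def depth_scores_py_alt (scores : List Int) : List Int :=
  let n : Int := (scores.length : Int)
  let clip : Int := min (max (PySem.Int.floordiv n 10) 2) 5
  let L := lpassB none scores
  let R := rpassB scores
  (List.range scores.length).map (fun (i : Nat) =>
    if clip ≤ (i : Int) ∧ (i : Int) < n - clip
    then L.getD i 0 + R.getD i 0 - 2 * scores.getD i 0
    else 0)

-- ===== PRECONDITION & SPEC =====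
def Spec_depth_scores_py (scores : List Int) (out : List Int) : Prop := out = depth_scores_py_alt scores
instance (scores : List Int) (out : List Int) : Decidable (Spec_depth_scores_py scores out) := by unfold Spec_depth_scores_py; infer_instance

-- ===== CLAIM (what is proved, stated in full; the proofs are below) =====
def Claim_equal_depth_scores_py : Prop := ∀ (scores : List Int), Dom_depth_scores_py scores → Spec_depth_scores_py scores (depth_scores_py scores)

-- ===== LEMMAS AND PROOFS =====

-- the depth value A writes at position j
def Dv (scores : List Int) (j : Nat) : Int :=
  climbA (scores.getD j 0) ((scores.take j).reverse)
    + climbA (scores.getD j 0) (scores.drop (j + 1))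
    - 2 * scores.getD j 0

-- the effect of A's outer loop on the depth list: set positions i..i+m-1 to Dv
def applyR (scores : List Int) : List Int → Nat → Nat → List Int
  | d, _, 0 => d
  | d, i, m + 1 => applyR scores (d.set i (Dv scores i)) (i + 1) m

theorem climbA_cons_self (x : Int) (r : List Int) : climbA x (x :: r) = climbA x r := by
  simp [climbA]

theorem length_applyR (scores : List Int) : ∀ (m i : Nat) (d : List Int),
    (applyR scores d i m).length = d.length := by
  intro m
  induction m with
  | zero => intro i d; rfl
  | succ m ih => intro i d; simp [applyR, ih]

theorem getD_applyR (scores : List Int) : ∀ (m i : Nat) (d : List Int), d.length = scores.length →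
    i + m ≤ scores.length → ∀ j : Nat,
    (applyR scores d i m).getD j 0 = if i ≤ j ∧ j < i + m then Dv scores j else d.getD j 0 := by
  intro m
  induction m with
  | zero => intro i d _ _ j; simp [applyR]
  | succ m ih =>
    intro i d hd hm j
    rw [applyR, ih (i + 1) _ (by simpa using hd) (by omega) j]
    by_cases h1 : i + 1 ≤ j ∧ j < i + 1 + m
    · rw [if_pos h1, if_pos (by omega)]
    · rw [if_neg h1]
      by_cases h2 : i ≤ j ∧ j < i + (m + 1)
      · have hij : j = i := by omega
        subst hij
        rw [if_pos (by omega)]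
        have hjs : j < scores.length := by omega
        simp [List.getD, hd, hjs]
      · rw [if_neg h2]
        have hij : i ≠ j := by omega
        simp [List.getD, List.getElem?_set_ne hij]

theorem outerA_eq_applyR (scores : List Int) : ∀ (m i : Nat) (d : List Int),
    i + m ≤ scores.length →
    outerA scores d (i : Int) ((scores.drop i).take m) = applyR scores d i m := by
  intro m
  induction m with
  | zero => intro i d _; simp [outerA, applyR]
  | succ m ih =>
    intro i d hm
    have hi : i < scores.length := by omega
    have hdrop : scores.drop i = scores[i] :: scores.drop (i + 1) :=
      List.drop_eq_getElem_cons hi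
    have htake : (scores.take (i + 1)).reverse = scores[i] :: (scores.take i).reverse := by
      rw [List.take_add_one]
      simp [hi]
    rw [hdrop, List.take_succ_cons, outerA]
    have hslice : PySem.List.slice scores (some (i : Int)) none = scores.drop i :=
      PySem.List.slice_from_natCast scores i
    simp only [Int.toNat_natCast, hslice, hdrop, htake, climbA_cons_self]
    have harg : (i : Int) + 1 = ((i + 1 : Nat) : Int) := by push_cast; ring
    rw [harg, ih (i + 1) _ (by omega)]
    have hDv : Dv scores i
        = climbA scores[i] (scores.take i).reverse
          + climbA scores[i] (scores.drop (i + 1)) - 2 * scores[i] := by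
      simp [Dv, List.getD_eq_getElem?_getD, List.getElem?_eq_getElem hi]
    conv_rhs => rw [applyR]
    rw [hDv]

-- B's left pass computes the left climb over the reversed prefix
def lspec : List Int → List Int → List Int
  | _, [] => []
  | r, s :: rest => climbA s r :: lspec (s :: r) rest

def prevOf : List Int → Option (Int × Int)
  | [] => none
  | p :: r' => some (p, climbA p r')

theorem lpassB_eq_lspec : ∀ (xs r : List Int), lpassB (prevOf r) xs = lspec r xs := by
  intro xs
  induction xs with
  | nil => intro r; cases r <;> rfl
  | cons s rest ih =>
    intro r
    have hv : (match prevOf r with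
        | some (ps, pl) => if ps ≥ s then pl else s
        | none => s) = climbA s r := by
      cases r with
      | nil => rfl
      | cons p r' => simp [prevOf, climbA]
    cases r with
    | nil =>
      simp only [lpassB, lspec, prevOf] at *
      rw [← ih [s]]
      simp [climbA]
    | cons p r' =>
      simp only [lpassB, lspec, prevOf] at hv ⊢
      rw [hv, ← ih (s :: p :: r')]
      simp [prevOf]

theorem getD_lspec : ∀ (xs r : List Int) (j : Nat), j < xs.length →
    (lspec r xs).getD j 0 = climbA (xs.getD j 0) ((xs.take j).reverse ++ r) := by
  intro xs
  induction xs with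
  | nil => intro r j h; simp at h
  | cons s rest ih =>
    intro r j h
    cases j with
    | zero => simp [lspec]
    | succ j =>
      simp only [lspec, List.getD_cons_succ, List.take_succ_cons, List.reverse_cons,
        List.getD_cons_succ]
      rw [ih (s :: r) j (by simpa using h)]
      simp

-- B's right pass computes the right climb over the suffix
def rspec : List Int → List Int
  | [] => []
  | s :: rest => climbA s rest :: rspec rest

theorem rpassB_eq_rspec : ∀ (xs : List Int), rpassB xs = rspec xs := by
  intro xs
  induction xs with
  | nil => rfl
  | cons s rest ih =>
    cases rest with
    | nil => rfl
    | cons s' rest' =>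
      have h2 : rpassB (s' :: rest') = climbA s' rest' :: rspec rest' := ih.trans rfl
      show (let r := rpassB (s' :: rest');
        (match s' :: rest', r with
         | s'' :: _, v :: _ => if s'' ≥ s then v else s
         | _, _ => s) :: r) = rspec (s :: s' :: rest')
      rw [h2]
      rfl

theorem getD_rspec : ∀ (xs : List Int) (j : Nat), j < xs.length →
    (rspec xs).getD j 0 = climbA (xs.getD j 0) (xs.drop (j + 1)) := by
  intro xs
  induction xs with
  | nil => intro j h; simp at h
  | cons s rest ih =>
    intro j h
    cases j with
    | zero => simp [rspec]
    | succ j =>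
      simp only [rspec, List.getD_cons_succ, List.drop_succ_cons]
      exact ih j (by simpa using h)

-- ===== VERDICT (by name: the statement is the Claim_ definition above) =====
theorem depth_scores_py_spec : Claim_equal_depth_scores_py := by
  intro scores _
  unfold Spec_depth_scores_py
  simp only [depth_scores_py, depth_scores_py_alt]
  set n := scores.length with hn
  set clip : Int := min (max (PySem.Int.floordiv (n : Int) 10) 2) 5 with hclip
  have hclip2 : 2 ≤ clip := le_min (le_trans (by norm_num) (le_max_right _ _)) (by norm_num)
  set c : Nat := clip.toNat with hc
  have hcast : (c : Int) = clip := Int.toNat_of_nonneg (by omega)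
  have hsl : PySem.List.slice scores (some clip) (some (-clip))
      = (scores.drop (min c n)).take ((n - c) - min c n) := by
    rw [← hcast]
    simp [PySem.List.slice, PySem.List.clampIdx_neg_natCast _ _ (by omega : 0 < c), hn]
  have hL : lpassB none scores = lspec [] scores := lpassB_eq_lspec scores []
  have hR : rpassB scores = rspec scores := rpassB_eq_rspec scores
  rw [hsl, hL, hR, ← hcast]
  rcases le_or_gt c n with hcn | hcn
  · -- clip fits inside the list: the outer loop runs over indices c .. n-c-1
    rw [min_eq_left hcn, outerA_eq_applyR scores ((n - c) - c) c _ (by omega)]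
    apply List.ext_getElem
    · simp [length_applyR, hn]
    · intro j hj1 hj2
      have hjn : j < n := by simpa [length_applyR] using hj1
      rw [← List.getD_eq_getElem _ 0 hj1, ← List.getD_eq_getElem _ 0 hj2,
        getD_applyR scores ((n - c) - c) c _ (by simp) (by omega) j]
      have hB : ((List.range n).map (fun (i : Nat) =>
          if (c : Int) ≤ (i : Int) ∧ (i : Int) < ((n : Nat) : Int) - (c : Int)
          then (lspec [] scores).getD i 0 + (rspec scores).getD i 0 - 2 * scores.getD i 0
          else 0)).getD j 0
          = if (c : Int) ≤ (j : Int) ∧ (j : Int) < ((n : Nat) : Int) - (c : Int)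
            then (lspec [] scores).getD j 0 + (rspec scores).getD j 0 - 2 * scores.getD j 0
            else 0 := by
        rw [List.getD_eq_getElem _ 0 (by simpa using hjn)]
        simp
      rw [hB, getD_lspec scores [] j (by omega), getD_rspec scores j (by omega)]
      by_cases hcond : c ≤ j ∧ j < c + ((n - c) - c)
      · rw [if_pos hcond, if_pos (by omega), Dv]
        simp
      · rw [if_neg hcond, if_neg (by omega)]
        simp [List.getD_eq_getElem?_getD]
  · -- the list is shorter than clip: the slice is empty and everything stays 0
    rw [min_eq_right (le_of_lt hcn), (by omega : (n - c) - n = 0)]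
    simp only [List.take_zero, outerA]
    apply List.ext_getElem
    · simp [hn]
    · intro j hj1 hj2
      have hjn : j < n := by simpa [hn] using hj1
      simp
      intro _ h2
      omega
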